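-- pv_equiv track=rewrite | github.com/phantrang151/2-Player-Game-Battleships | Player1_final.py | setup_ships_with_lucky_number
-- ===== SOURCE A (Python) =====
-- def setup_ships_with_lucky_number(lucky_number):
--     # to set up a ships given a random number
--     # input: a random integer
--     # output: the configuration of our board
--
--     grid = [ [0 for i in range(10)] for j in range(10)]
--
--     """
--     Below are 5 positions that we think are hard to guess
--     Placing strategies:
--         1. Ships are not next to each other
--         2. 2 ships are in the L shapes
--         3. Ships are not at the center
--         4. Do not place ships symmetrical
--         5. Be unpredictable, use random function
--     """
--     if lucky_number == 1:
--             grid[3][9] = 1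
--             for row in range(6,8): grid[row][0] = 2
--             for col in range(3,6): grid[7][col] = 3
--             for row in range(5,9): grid[row][8] = 4
--             for col in range(2,7): grid[1][col] = 5
--
--     elif lucky_number == 2:
--             grid[7][0] = 1
--             for row in range(4,6): grid[row][7] = 2
--             for row in range(3,6): grid[row][2] = 3
--             for col in range(5,9): grid[1][col] = 4
--             for col in range(4,9): grid[8][col] = 5
--
--     elif lucky_number == 3:
--             grid[0][1] = 1
--             for col in range(7,9): grid[8][col] = 2
--             for row in range(6,9): grid[row][1] = 3
--             for row in range(5,9): grid[row][4] = 4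
--             for col in range(3,8): grid[2][col] = 5
--
--     elif lucky_number == 4:
--             grid[3][9] = 1
--             for row in range(3,5): grid[row][1] = 2
--             for col in range(2,5): grid[8][col] = 3
--             for row in range(4,8): grid[row][7] = 4
--             for col in range(3,8): grid[1][col] = 5
--
--     elif lucky_number == 5:
--             grid[8][9] = 1
--             for row in range(7,9): grid[row][1] = 2
--             for row in range(1,4): grid[row][8] = 3
--             for col in range(2,6): grid[4][col] = 4
--             for col in range(1,6): grid[1][col] = 5
--
--     return grid
-- ===== SOURCE B (Python) =====
-- # Each fleet is a list of ships (value, row0, col0, horizontal, length); the grid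
-- # is built purely, cell by cell, from segment-membership tests (no mutation).
-- FLEETS = {
--     1: [(1, 3, 9, True, 1), (2, 6, 0, False, 2), (3, 7, 3, True, 3),
--         (4, 5, 8, False, 4), (5, 1, 2, True, 5)],
--     2: [(1, 7, 0, True, 1), (2, 4, 7, False, 2), (3, 3, 2, False, 3),
--         (4, 1, 5, True, 4), (5, 8, 4, True, 5)],
--     3: [(1, 0, 1, True, 1), (2, 8, 7, True, 2), (3, 6, 1, False, 3),
--         (4, 5, 4, False, 4), (5, 2, 3, True, 5)],
--     4: [(1, 3, 9, True, 1), (2, 3, 1, False, 2), (3, 8, 2, True, 3),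
--         (4, 4, 7, False, 4), (5, 1, 3, True, 5)],
--     5: [(1, 8, 9, True, 1), (2, 7, 1, False, 2), (3, 1, 8, False, 3),
--         (4, 4, 2, True, 4), (5, 1, 1, True, 5)],
-- }
--
--
-- def _cell(ships, r, c):
--     # value of cell (r, c): the ship whose segment covers it, else water (0)
--     for v, r0, c0, horizontal, length in ships:
--         if horizontal:
--             if r == r0 and c0 <= c < c0 + length:
--                 return v
--         else:
--             if c == c0 and r0 <= r < r0 + length:
--                 return v
--     return 0
--
--
-- def setup_ships_with_lucky_number(lucky_number):
--     ships = FLEETS.get(lucky_number, [])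
--     return [[_cell(ships, r, c) for c in range(10)] for r in range(10)]
-- ===== Notes on version B (the rewrite author's own statement) =====
-- stated objective: alternative
-- what changed: Instead of allocating a zero grid and mutating cells branch by branch, B encodes each fleet as ship segments (value, start, orientation, length) and builds the grid purely, computing every cell's value by segment-membership tests; unknown lucky numbers get an empty fleet and hence an all-zero grid.
import Mathlib
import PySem

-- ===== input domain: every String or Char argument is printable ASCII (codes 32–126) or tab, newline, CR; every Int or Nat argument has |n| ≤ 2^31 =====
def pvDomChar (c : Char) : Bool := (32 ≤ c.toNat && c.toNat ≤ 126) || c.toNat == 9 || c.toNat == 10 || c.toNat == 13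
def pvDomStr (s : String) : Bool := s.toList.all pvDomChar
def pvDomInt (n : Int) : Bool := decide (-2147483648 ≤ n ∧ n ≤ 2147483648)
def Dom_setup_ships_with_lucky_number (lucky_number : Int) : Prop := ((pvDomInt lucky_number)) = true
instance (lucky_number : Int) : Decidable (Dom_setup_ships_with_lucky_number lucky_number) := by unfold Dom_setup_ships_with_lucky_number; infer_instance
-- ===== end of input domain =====

-- B builds the grid purely, cell by cell, from ship-segment membership tests
-- instead of A's branch-by-branch mutation of a zero grid (objective: alternative).

-- ===== PORT A =====
-- grid[r][c] = v for the in-range nonnegative literal indices A uses (exact there)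
def pvSetCell (g : List (List Int)) (r c : Int) (v : Int) : List (List Int) :=
  g.set r.natAbs ((g.getD r.natAbs []).set c.natAbs v)

def setup_ships_with_lucky_number (lucky_number : Int) : List (List Int) :=
  -- grid = [[0 for i in range(10)] for j in range(10)]
  let grid : List (List Int) :=
    (PySem.List.pyRange 0 10 1).map (fun _ => (PySem.List.pyRange 0 10 1).map (fun _ => 0))
  if lucky_number = 1 then
    let grid := pvSetCell grid 3 9 1
    let grid := (PySem.List.pyRange 6 8 1).foldl (fun g row => pvSetCell g row 0 2) grid
    let grid := (PySem.List.pyRange 3 6 1).foldl (fun g col => pvSetCell g 7 col 3) grid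
    let grid := (PySem.List.pyRange 5 9 1).foldl (fun g row => pvSetCell g row 8 4) grid
    (PySem.List.pyRange 2 7 1).foldl (fun g col => pvSetCell g 1 col 5) grid
  else if lucky_number = 2 then
    let grid := pvSetCell grid 7 0 1
    let grid := (PySem.List.pyRange 4 6 1).foldl (fun g row => pvSetCell g row 7 2) grid
    let grid := (PySem.List.pyRange 3 6 1).foldl (fun g row => pvSetCell g row 2 3) grid
    let grid := (PySem.List.pyRange 5 9 1).foldl (fun g col => pvSetCell g 1 col 4) grid
    (PySem.List.pyRange 4 9 1).foldl (fun g col => pvSetCell g 8 col 5) grid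
  else if lucky_number = 3 then
    let grid := pvSetCell grid 0 1 1
    let grid := (PySem.List.pyRange 7 9 1).foldl (fun g col => pvSetCell g 8 col 2) grid
    let grid := (PySem.List.pyRange 6 9 1).foldl (fun g row => pvSetCell g row 1 3) grid
    let grid := (PySem.List.pyRange 5 9 1).foldl (fun g row => pvSetCell g row 4 4) grid
    (PySem.List.pyRange 3 8 1).foldl (fun g col => pvSetCell g 2 col 5) grid
  else if lucky_number = 4 then
    let grid := pvSetCell grid 3 9 1
    let grid := (PySem.List.pyRange 3 5 1).foldl (fun g row => pvSetCell g row 1 2) grid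
    let grid := (PySem.List.pyRange 2 5 1).foldl (fun g col => pvSetCell g 8 col 3) grid
    let grid := (PySem.List.pyRange 4 8 1).foldl (fun g row => pvSetCell g row 7 4) grid
    (PySem.List.pyRange 3 8 1).foldl (fun g col => pvSetCell g 1 col 5) grid
  else if lucky_number = 5 then
    let grid := pvSetCell grid 8 9 1
    let grid := (PySem.List.pyRange 7 9 1).foldl (fun g row => pvSetCell g row 1 2) grid
    let grid := (PySem.List.pyRange 1 4 1).foldl (fun g row => pvSetCell g row 8 3) grid
    let grid := (PySem.List.pyRange 2 6 1).foldl (fun g col => pvSetCell g 4 col 4) grid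
    (PySem.List.pyRange 1 6 1).foldl (fun g col => pvSetCell g 1 col 5) grid
  else grid

-- ===== PORT B =====
-- FLEETS of Source B: lucky_number -> ships (value, row0, col0, horizontal, length)
def pvFleets : PySem.Dict Int (List (Int × Int × Int × Bool × Int)) :=
  PySem.Dict.ofList
    [ (1, [(1, 3, 9, true, 1), (2, 6, 0, false, 2), (3, 7, 3, true, 3),
           (4, 5, 8, false, 4), (5, 1, 2, true, 5)])
    , (2, [(1, 7, 0, true, 1), (2, 4, 7, false, 2), (3, 3, 2, false, 3),
           (4, 1, 5, true, 4), (5, 8, 4, true, 5)])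
    , (3, [(1, 0, 1, true, 1), (2, 8, 7, true, 2), (3, 6, 1, false, 3),
           (4, 5, 4, false, 4), (5, 2, 3, true, 5)])
    , (4, [(1, 3, 9, true, 1), (2, 3, 1, false, 2), (3, 8, 2, true, 3),
           (4, 4, 7, false, 4), (5, 1, 3, true, 5)])
    , (5, [(1, 8, 9, true, 1), (2, 7, 1, false, 2), (3, 1, 8, false, 3),
           (4, 4, 2, true, 4), (5, 1, 1, true, 5)]) ]

-- _cell of Source B: first ship whose segment covers (r, c), else 0
def pvCell (ships : List (Int × Int × Int × Bool × Int)) (r c : Int) : Int :=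
  match ships with
  | [] => 0
  | (v, r0, c0, horizontal, length) :: rest =>
    if horizontal then
      if r = r0 ∧ c0 ≤ c ∧ c < c0 + length then v else pvCell rest r c
    else
      if c = c0 ∧ r0 ≤ r ∧ r < r0 + length then v else pvCell rest r c

def setup_ships_with_lucky_number_alt (lucky_number : Int) : List (List Int) :=
  let ships := pvFleets.getD lucky_number []
  (PySem.List.pyRange 0 10 1).map (fun r =>
    (PySem.List.pyRange 0 10 1).map (fun c => pvCell ships r c))

-- ===== PRECONDITION & SPEC =====
def Spec_setup_ships_with_lucky_number (lucky_number : Int) (out : List (List Int)) : Prop := out = setup_ships_with_lucky_number_alt lucky_number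
instance (lucky_number : Int) (out : List (List Int)) : Decidable (Spec_setup_ships_with_lucky_number lucky_number out) := by unfold Spec_setup_ships_with_lucky_number; infer_instance

-- ===== CLAIM (what is proved, stated in full; the proofs are below) =====
def Claim_equal_setup_ships_with_lucky_number : Prop := ∀ (lucky_number : Int), Dom_setup_ships_with_lucky_number lucky_number → Spec_setup_ships_with_lucky_number lucky_number (setup_ships_with_lucky_number lucky_number)

-- ===== LEMMAS AND PROOFS =====
theorem pvAgree_default (n : Int) (h1 : n ≠ 1) (h2 : n ≠ 2) (h3 : n ≠ 3)
    (h4 : n ≠ 4) (h5 : n ≠ 5) :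
    setup_ships_with_lucky_number n = setup_ships_with_lucky_number_alt n := by
  unfold setup_ships_with_lucky_number setup_ships_with_lucky_number_alt
  simp only [if_neg h1, if_neg h2, if_neg h3, if_neg h4, if_neg h5]
  have hnone : pvFleets.get? n = none := by
    simp only [pvFleets, PySem.Dict.ofList, PySem.Dict.update, List.foldl_cons, List.foldl_nil]
    simp [PySem.Dict.get?_insert, h1, h2, h3, h4, h5]
  rw [PySem.Dict.getD_eq_get?_getD, hnone]
  decide

-- ===== VERDICT (by name: the statement is the Claim_ definition above) =====
theorem setup_ships_with_lucky_number_spec : Claim_equal_setup_ships_with_lucky_number := by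
  intro n _
  unfold Spec_setup_ships_with_lucky_number
  by_cases h1 : n = 1; · subst h1; decide
  by_cases h2 : n = 2; · subst h2; decide
  by_cases h3 : n = 3; · subst h3; decide
  by_cases h4 : n = 4; · subst h4; decide
  by_cases h5 : n = 5; · subst h5; decide
  exact (pvAgree_default n h1 h2 h3 h4 h5).symm ▸ rfl
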